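-- pv_equiv track=rewrite | github.com/blue4683/practice_ct | BOJ/Platinum/10165. 버스 노선/10165.py | check
-- ===== SOURCE A (Python) =====
-- def check(arr):
--     arr.sort(key=lambda x: (x[1], -x[2]))
--     result = []
--
--     for number, start, end in arr:
--         if result and result[-1][2] >= end:
--             continue
--
--         result.append((number, start, end))
--
--     return result
-- ===== SOURCE B (Python) =====
-- def check(arr):
--     arr.sort(key=lambda x: (x[1], -x[2]))
--     # exclusive prefix maxima of the end values (None before the first element)
--     pm = []
--     m = None
--     for t in arr:
--         pm.append(m)
--         m = t[2] if m is None or t[2] > m else m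
--     return [t for t, p in zip(arr, pm) if p is None or t[2] > p]
-- ===== Notes on version B (the rewrite author's own statement) =====
-- stated objective: alternative
-- what changed: Replaces the interleaved greedy 'compare end to last kept interval' with a two-pass structure: first build a table of exclusive prefix maxima of the end values, then filter by comparing each end against that table.
import Mathlib
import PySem

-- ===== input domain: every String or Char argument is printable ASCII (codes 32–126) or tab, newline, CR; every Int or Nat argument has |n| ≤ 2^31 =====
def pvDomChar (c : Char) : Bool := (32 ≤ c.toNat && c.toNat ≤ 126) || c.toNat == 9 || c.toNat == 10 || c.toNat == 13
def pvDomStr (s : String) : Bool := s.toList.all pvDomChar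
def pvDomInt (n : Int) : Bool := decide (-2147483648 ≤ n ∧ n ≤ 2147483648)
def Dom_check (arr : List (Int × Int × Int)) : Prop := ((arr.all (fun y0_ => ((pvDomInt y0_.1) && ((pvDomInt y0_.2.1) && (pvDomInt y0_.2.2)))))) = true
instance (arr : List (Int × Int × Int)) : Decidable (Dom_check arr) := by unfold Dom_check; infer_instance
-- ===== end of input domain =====

-- B replaces A's interleaved greedy (compare each end to the last kept interval) by a two-pass
-- structure: build the table of exclusive prefix maxima of the end values, then filter against it.
-- Same asymptotic cost; equivalence on the RETURN value (both sort the argument the same way).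

-- ===== PORT A =====
-- greedy loop body: skip t when result is nonempty and result[-1][2] >= end, else append
def check (arr : List (Int × Int × Int)) : List (Int × Int × Int) :=
  (PySem.List.sorted2 arr (fun x => x.2.1) (fun x => -x.2.2) false).foldl
    (fun result t =>
      match result.getLast? with
      | some r => if r.2.2 ≥ t.2.2 then result else result ++ [t]
      | none => result ++ [t])
    []

-- ===== PORT B =====
-- exclusive prefix maxima of the end values (none before the first element)
def pmAux (m : Option Int) : List (Int × Int × Int) → List (Option Int)
  | [] => []
  | t :: ts =>
      m :: pmAux (some (match m with
                        | none => t.2.2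
                        | some v => if t.2.2 > v then t.2.2 else v)) ts

def check_alt (arr : List (Int × Int × Int)) : List (Int × Int × Int) :=
  let s := PySem.List.sorted2 arr (fun x => x.2.1) (fun x => -x.2.2) false
  ((s.zip (pmAux none s)).filter
      (fun tp => match tp.2 with
                 | none => true
                 | some p => decide (tp.1.2.2 > p))).map (·.1)

-- ===== PRECONDITION & SPEC =====
def Spec_check (arr : List (Int × Int × Int)) (out : List (Int × Int × Int)) : Prop := out = check_alt arr
instance (arr : List (Int × Int × Int)) (out : List (Int × Int × Int)) : Decidable (Spec_check arr out) := by unfold Spec_check; infer_instance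

-- ===== CLAIM (what is proved, stated in full; the proofs are below) =====
def Claim_equal_check : Prop := ∀ (arr : List (Int × Int × Int)), Dom_check arr → Spec_check arr (check arr)

-- ===== LEMMAS AND PROOFS =====

-- the greedy fold body of A's port, named for the induction
def greedyStep (result : List (Int × Int × Int)) (t : Int × Int × Int) : List (Int × Int × Int) :=
  match result.getLast? with
  | some r => if r.2.2 ≥ t.2.2 then result else result ++ [t]
  | none => result ++ [t]

-- B's filter-against-the-table pass, on the sorted list, starting from running max m
def tableFilter (m : Option Int) (s : List (Int × Int × Int)) : List (Int × Int × Int) :=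
  ((s.zip (pmAux m s)).filter
      (fun tp => match tp.2 with
                 | none => true
                 | some p => decide (tp.1.2.2 > p))).map (·.1)

-- invariant: the greedy's last kept end equals the running maximum of all processed ends
theorem greedy_eq_table (s : List (Int × Int × Int)) :
    ∀ (acc : List (Int × Int × Int)) (m : Option Int),
      (match m with
       | none => acc = []
       | some v => ∃ r, acc.getLast? = some r ∧ r.2.2 = v) →
      s.foldl greedyStep acc = acc ++ tableFilter m s := by
  induction s with
  | nil => intro acc m _; simp [tableFilter, pmAux]
  | cons t ts ih =>
    intro acc m hm
    match m with
    | none =>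
      subst hm
      have h1 : greedyStep [] t = [t] := by simp [greedyStep]
      have h2 := ih [t] (some t.2.2) ⟨t, by simp, rfl⟩
      simp only [List.foldl_cons, h1, h2]
      simp [tableFilter, pmAux]
    | some v =>
      obtain ⟨r, hr, hv⟩ := hm
      by_cases hge : r.2.2 ≥ t.2.2
      · -- skipped by the greedy; filtered out by the table (t.2.2 ≤ v, max unchanged)
        have h1 : greedyStep acc t = acc := by simp [greedyStep, hr, hge]
        have h2 := ih acc (some v) ⟨r, hr, hv⟩
        simp only [List.foldl_cons, h1, h2]
        simp only [tableFilter, pmAux, List.zip_cons_cons, List.filter_cons]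
        have : ¬ t.2.2 > v := by omega
        simp [this]
      · -- kept by the greedy; kept by the table (t.2.2 > v, max becomes t.2.2)
        have hgt : t.2.2 > v := by omega
        have h1 : greedyStep acc t = acc ++ [t] := by simp [greedyStep, hr, hge]
        have hlast : (acc ++ [t]).getLast? = some t := by simp
        have h2 := ih (acc ++ [t]) (some t.2.2) ⟨t, hlast, rfl⟩
        simp only [List.foldl_cons, h1, h2]
        simp only [tableFilter, pmAux, List.zip_cons_cons, List.filter_cons]
        simp [hgt, List.append_assoc]

-- ===== VERDICT (by name: the statement is the Claim_ definition above) =====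
theorem check_spec : Claim_equal_check := by
  intro arr _
  unfold Spec_check check check_alt
  have := greedy_eq_table (PySem.List.sorted2 arr (fun x => x.2.1) (fun x => -x.2.2) false) [] none rfl
  simpa [greedyStep, tableFilter] using this
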